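-- pv_equiv track=rewrite | github.com/sahilsharma884/Coding | Hackerearth/Algorithms/Linear Search/Hexadecimal_numbers.py | Dec2Hexa
-- ===== SOURCE A (Python) =====
-- def Dec2Hexa(X):
-- 	sum_hexaX = 0
-- 	while X >= 16:
-- 		rem = X % 16
-- 		if rem != 0:
-- 			sum_hexaX += rem
-- 		X = X // 16
--
-- 	if X != 0:
-- 		sum_hexaX += X
--
-- 	return sum_hexaX
-- ===== SOURCE B (Python) =====
-- def Dec2Hexa(X):
--     if X < 16:
--         return X
--     return sum(int(c, 16) for c in format(X, 'x'))
-- ===== Notes on version B (the rewrite author's own statement) =====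
-- stated objective: idiomatic
-- what changed: B replaces A's manual %/ // digit-peeling loop with the library hex formatting (format(X,'x')) and a sum over the digit characters, returning X directly when X < 16 (where A's loop never runs).
import Mathlib
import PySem

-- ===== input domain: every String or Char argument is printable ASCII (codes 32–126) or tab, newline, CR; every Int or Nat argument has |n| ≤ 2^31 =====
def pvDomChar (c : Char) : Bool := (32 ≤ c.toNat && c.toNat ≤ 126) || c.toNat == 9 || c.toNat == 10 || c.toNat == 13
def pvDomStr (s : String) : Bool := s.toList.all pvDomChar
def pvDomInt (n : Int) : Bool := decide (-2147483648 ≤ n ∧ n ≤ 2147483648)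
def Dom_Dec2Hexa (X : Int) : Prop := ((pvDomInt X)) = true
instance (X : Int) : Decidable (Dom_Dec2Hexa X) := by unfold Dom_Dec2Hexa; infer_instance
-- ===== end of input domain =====

-- B replaces A's %/ // peeling loop with library hex digits summed (idiomatic); equal to A everywhere.
-- ===== PORT A =====
-- the while loop: state (X, sum_hexaX); returns them when the guard fails
def Dec2HexaLoop (X : Int) (sum_hexaX : Int) : Int × Int :=
  if h : 16 ≤ X then
    let rem := PySem.Int.mod X 16
    Dec2HexaLoop (PySem.Int.floordiv X 16) (if rem ≠ 0 then sum_hexaX + rem else sum_hexaX)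
  else (X, sum_hexaX)
termination_by X.toNat
decreasing_by
  have h2 : PySem.Int.floordiv X 16 = X / 16 := PySem.Int.floordiv_eq_ediv_of_pos (by omega)
  rw [h2]; omega

def Dec2Hexa (X : Int) : Int :=
  let p := Dec2HexaLoop X 0
  if p.1 ≠ 0 then p.2 + p.1 else p.2

-- ===== PORT B =====
-- format(X,'x') ported as Nat.digits 16 (same multiset of hex digit values); int(c,16)-sum = digit sum
def Dec2Hexa_alt (X : Int) : Int :=
  if X < 16 then X else ((Nat.digits 16 X.toNat).sum : Int)

-- ===== PRECONDITION & SPEC =====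
def Spec_Dec2Hexa (X : Int) (out : Int) : Prop := out = Dec2Hexa_alt X
instance (X : Int) (out : Int) : Decidable (Spec_Dec2Hexa X out) := by unfold Spec_Dec2Hexa; infer_instance

-- ===== CLAIM (what is proved, stated in full; the proofs are below) =====
def Claim_equal_Dec2Hexa : Prop := ∀ (X : Int), Dom_Dec2Hexa X → Spec_Dec2Hexa X (Dec2Hexa X)

-- ===== LEMMAS AND PROOFS =====

-- ===== VERDICT (by name: the statement is the Claim_ definition above) =====
-- final step of A applied to the loop's result
def afterLoop (p : Int × Int) : Int := if p.1 ≠ 0 then p.2 + p.1 else p.2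

theorem loop_digits (n : Nat) : ∀ s : Int,
    afterLoop (Dec2HexaLoop (n : Int) s) = s + ((Nat.digits 16 n).sum : Int) := by
  induction n using Nat.strong_induction_on with
  | _ n ih =>
    intro s
    by_cases h16 : 16 ≤ n
    · rw [Dec2HexaLoop]
      have hg : 16 ≤ (n : Int) := by exact_mod_cast h16
      rw [dif_pos hg]
      have hmod : PySem.Int.mod (n : Int) 16 = ((n % 16 : Nat) : Int) := by
        exact_mod_cast PySem.Int.mod_natCast n 16
      have hdiv : PySem.Int.floordiv (n : Int) 16 = ((n / 16 : Nat) : Int) := by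
        exact_mod_cast PySem.Int.floordiv_natCast n 16
      have hrec := ih (n / 16) (by omega)
      have hdig : Nat.digits 16 n = n % 16 :: Nat.digits 16 (n / 16) :=
        Nat.digits_def' (by omega) (by omega)
      by_cases hz : ((n % 16 : Nat) : Int) = 0
      · simp only [hmod, hdiv, hz, ne_eq, not_true_eq_false, if_false, if_neg]
        rw [hrec, hdig]
        simp only [List.sum_cons]
        push_cast
        omega
      · simp only [hmod, hdiv, ne_eq, hz, not_false_eq_true, if_true, if_pos]
        rw [hrec, hdig]
        simp only [List.sum_cons]
        push_cast
        omega
    · rw [Dec2HexaLoop]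
      have hg : ¬ (16 ≤ (n : Int)) := by exact_mod_cast h16
      rw [dif_neg hg]
      unfold afterLoop
      interval_cases n <;> simp

theorem Dec2Hexa_spec : Claim_equal_Dec2Hexa := by
  intro X _
  unfold Spec_Dec2Hexa Dec2Hexa Dec2Hexa_alt
  by_cases h : X < 16
  · rw [Dec2HexaLoop, dif_neg (by omega), if_pos h]
    by_cases hz : X = 0 <;> simp [hz]
  · rw [if_neg h]
    have hX : ((X.toNat : Nat) : Int) = X := by omega
    have h2 := loop_digits X.toNat 0
    unfold afterLoop at h2
    rw [hX] at h2
    rw [h2]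
    simp
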